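-- pv_equiv track=rewrite | github.com/ceeoinnovations/musicalInstruments | Useful Functions (SPIKE 3.0 [color & distance calibration, and MIDI])/Color Sensor/Color Sensor Calibration/calculate_rgbi_min_max.py | calculate_rgbi_min_max
-- ===== SOURCE A (Python) =====
-- def calculate_rgbi_min_max(current_list_all_rgbi):
--
--     # Initialize min and max value of each r, g, b, i as the first recorded values for each color
--     # Assign min & max as first values to start
--     min_rgbi = [current_list_all_rgbi[0][0], current_list_all_rgbi[0][1], current_list_all_rgbi[0][2], current_list_all_rgbi[0][3]]
--     max_rgbi = [current_list_all_rgbi[0][0], current_list_all_rgbi[0][1], current_list_all_rgbi[0][2], current_list_all_rgbi[0][3]]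
--     current_num_training_colors = len(current_list_all_rgbi)
--
--     # Loop through each test rgbi value set
--     for i in range (current_num_training_colors):
--         # Loop through each r, g, b, i of each set
--         for j in range(4):
--
--             current_value = current_list_all_rgbi[i][j]
--             current_min = min_rgbi[j]
--             current_max = max_rgbi[j]
--
--             # Finds actual rgbi min / max
--             if current_value < current_min:
--                 min_rgbi[j] = current_value
--             if current_value > current_max:
--                 max_rgbi[j] = current_value
--
--     return min_rgbi, max_rgbi
-- ===== SOURCE B (Python) =====
-- def calculate_rgbi_min_max(current_list_all_rgbi):
--     # Transpose into per-channel columns, then take one min and one max per column.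
--     cols = list(zip(*current_list_all_rgbi))
--     min_rgbi = [min(cols[j]) for j in range(4)]
--     max_rgbi = [max(cols[j]) for j in range(4)]
--     return min_rgbi, max_rgbi
-- ===== Notes on version B (the rewrite author's own statement) =====
-- stated objective: simpler
-- what changed: Replaces A's running-accumulator nested loop (initialise from row 0, then update 4-slot min/max lists row by row) with a transpose via zip(*rows) followed by four independent per-column min() and max() reductions.
import Mathlib
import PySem

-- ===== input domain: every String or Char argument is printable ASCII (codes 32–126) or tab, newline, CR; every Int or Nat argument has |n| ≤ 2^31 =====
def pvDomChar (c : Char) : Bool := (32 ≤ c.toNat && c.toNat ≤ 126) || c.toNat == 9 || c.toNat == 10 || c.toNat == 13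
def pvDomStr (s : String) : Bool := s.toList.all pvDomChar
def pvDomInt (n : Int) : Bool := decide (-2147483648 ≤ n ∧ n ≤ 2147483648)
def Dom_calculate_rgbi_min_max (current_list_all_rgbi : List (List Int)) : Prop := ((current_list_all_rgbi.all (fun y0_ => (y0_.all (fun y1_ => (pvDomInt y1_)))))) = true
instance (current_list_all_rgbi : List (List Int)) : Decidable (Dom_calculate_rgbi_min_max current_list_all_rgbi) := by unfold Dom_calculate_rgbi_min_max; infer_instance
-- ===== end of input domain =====

-- B replaces A's running-accumulator nested loop by a transpose followed by four
-- independent per-column min/max reductions (objective: simpler decomposition).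

-- ===== PORT A =====
-- inner 'for j in range(4)' body of A, over the state (min_rgbi, max_rgbi) and one row
def pvStepA (st : List Int × List Int) (row : List Int) : List Int × List Int :=
  (PySem.List.pyRange 0 4 1).foldl (fun st j =>
    let current_value := PySem.List.pyGetD row j 0
    let current_min := PySem.List.pyGetD st.1 j 0
    let current_max := PySem.List.pyGetD st.2 j 0
    -- 'min_rgbi[j] = current_value': Python setitem at j ∈ range(4), a nonnegative in-range index
    let mn := if current_value < current_min then st.1.set j.toNat current_value else st.1
    let mx := if current_value > current_max then st.2.set j.toNat current_value else st.2
    (mn, mx)) st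

def calculate_rgbi_min_max (current_list_all_rgbi : List (List Int)) : List Int × List Int :=
  let row0 := PySem.List.pyGetD current_list_all_rgbi 0 []
  let min_rgbi := [PySem.List.pyGetD row0 0 0, PySem.List.pyGetD row0 1 0,
                   PySem.List.pyGetD row0 2 0, PySem.List.pyGetD row0 3 0]
  let max_rgbi := [PySem.List.pyGetD row0 0 0, PySem.List.pyGetD row0 1 0,
                   PySem.List.pyGetD row0 2 0, PySem.List.pyGetD row0 3 0]
  let current_num_training_colors : Int := (current_list_all_rgbi.length : Int)
  (PySem.List.pyRange 0 current_num_training_colors 1).foldl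
    (fun st i => pvStepA st (PySem.List.pyGetD current_list_all_rgbi i []))
    (min_rgbi, max_rgbi)

-- ===== PORT B =====
-- zip(*rows): number of columns = min of the row lengths (0 for no rows)
def pvZipLen (current_list_all_rgbi : List (List Int)) : Nat :=
  match current_list_all_rgbi.map List.length with
  | [] => 0
  | a :: t => t.foldl min a

def calculate_rgbi_min_max_alt (current_list_all_rgbi : List (List Int)) : List Int × List Int :=
  let cols : List (List Int) :=
    (List.range (pvZipLen current_list_all_rgbi)).map
      (fun j => current_list_all_rgbi.map (fun r => r.getD j 0))
  let min_rgbi := (PySem.List.pyRange 0 4 1).map (fun j =>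
    (PySem.List.min? (PySem.List.pyGetD cols j []) (fun y => y)).getD 0)
  let max_rgbi := (PySem.List.pyRange 0 4 1).map (fun j =>
    (PySem.List.max? (PySem.List.pyGetD cols j []) (fun y => y)).getD 0)
  (min_rgbi, max_rgbi)

-- ===== PRECONDITION & SPEC =====
-- Pre_ excludes exactly the inputs on which the Python A raises IndexError:
-- an empty list, or a row with fewer than 4 entries.
def Pre_calculate_rgbi_min_max (current_list_all_rgbi : List (List Int)) : Prop :=
  current_list_all_rgbi ≠ [] ∧ ∀ r ∈ current_list_all_rgbi, 4 ≤ r.length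
instance (current_list_all_rgbi : List (List Int)) : Decidable (Pre_calculate_rgbi_min_max current_list_all_rgbi) := by
  unfold Pre_calculate_rgbi_min_max; infer_instance
def pvWitness_calculate_rgbi_min_max : List (List Int) := [[1, 2, 3, 4], [0, 5, 2, 2]]

def Spec_calculate_rgbi_min_max (current_list_all_rgbi : List (List Int)) (out : List Int × List Int) : Prop := out = calculate_rgbi_min_max_alt current_list_all_rgbi
instance (current_list_all_rgbi : List (List Int)) (out : List Int × List Int) : Decidable (Spec_calculate_rgbi_min_max current_list_all_rgbi out) := by unfold Spec_calculate_rgbi_min_max; infer_instance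

-- ===== CLAIM (what is proved, stated in full; the proofs are below) =====
def Claim_equal_calculate_rgbi_min_max : Prop := ∀ (current_list_all_rgbi : List (List Int)), Dom_calculate_rgbi_min_max current_list_all_rgbi → Pre_calculate_rgbi_min_max current_list_all_rgbi → Spec_calculate_rgbi_min_max current_list_all_rgbi (calculate_rgbi_min_max current_list_all_rgbi)

-- ===== LEMMAS AND PROOFS =====

-- one pass of A's inner loop on a row of length ≥ 4 computes a pointwise min/max update
lemma pvLmin0 (v a b c d : Int) : (if v < a then [v,b,c,d] else [a,b,c,d]) = [min a v,b,c,d] := by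
  split_ifs <;> simp <;> omega
lemma pvLmin1 (v a b c d : Int) : (if v < b then [a,v,c,d] else [a,b,c,d]) = [a,min b v,c,d] := by
  split_ifs <;> simp <;> omega
lemma pvLmin2 (v a b c d : Int) : (if v < c then [a,b,v,d] else [a,b,c,d]) = [a,b,min c v,d] := by
  split_ifs <;> simp <;> omega
lemma pvLmin3 (v a b c d : Int) : (if v < d then [a,b,c,v] else [a,b,c,d]) = [a,b,c,min d v] := by
  split_ifs <;> simp <;> omega
lemma pvLmax0 (v a b c d : Int) : (if v > a then [v,b,c,d] else [a,b,c,d]) = [max a v,b,c,d] := by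
  split_ifs <;> simp <;> omega
lemma pvLmax1 (v a b c d : Int) : (if v > b then [a,v,c,d] else [a,b,c,d]) = [a,max b v,c,d] := by
  split_ifs <;> simp <;> omega
lemma pvLmax2 (v a b c d : Int) : (if v > c then [a,b,v,d] else [a,b,c,d]) = [a,b,max c v,d] := by
  split_ifs <;> simp <;> omega
lemma pvLmax3 (v a b c d : Int) : (if v > d then [a,b,c,v] else [a,b,c,d]) = [a,b,c,max d v] := by
  split_ifs <;> simp <;> omega

lemma pvStepA_eq (row : List Int) (a b c d e f g h : Int) :
    pvStepA ([a, b, c, d], [e, f, g, h]) row =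
      ([min a (row.getD 0 0), min b (row.getD 1 0), min c (row.getD 2 0), min d (row.getD 3 0)],
       [max e (row.getD 0 0), max f (row.getD 1 0), max g (row.getD 2 0), max h (row.getD 3 0)]) := by
  have h4 : PySem.List.pyRange 0 4 1 = [0, 1, 2, 3] := by decide
  simp only [pvStepA, h4, List.foldl_cons, List.foldl_nil, PySem.List.pyGetD_ofNat']
  norm_num [List.getD]
  rw [pvLmin0, pvLmax0]
  norm_num [List.set, show Int.toNat 2 = 2 from rfl, show Int.toNat 3 = 3 from rfl]
  rw [pvLmin1, pvLmax1]
  norm_num [List.set, show Int.toNat 2 = 2 from rfl, show Int.toNat 3 = 3 from rfl]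
  rw [pvLmin2, pvLmax2]
  norm_num [List.set, show Int.toNat 2 = 2 from rfl, show Int.toNat 3 = 3 from rfl]
  rw [pvLmin3, pvLmax3]
  simp

-- folding A's step over rows with lengths ≥ 4 yields per-channel running min/max folds
lemma pvFoldA_eq (rest : List (List Int)) (hr : ∀ r ∈ rest, 4 ≤ r.length)
    (a b c d e f g h : Int) :
    rest.foldl pvStepA ([a, b, c, d], [e, f, g, h]) =
      ([rest.foldl (fun m r => min m (r.getD 0 0)) a,
        rest.foldl (fun m r => min m (r.getD 1 0)) b,
        rest.foldl (fun m r => min m (r.getD 2 0)) c,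
        rest.foldl (fun m r => min m (r.getD 3 0)) d],
       [rest.foldl (fun m r => max m (r.getD 0 0)) e,
        rest.foldl (fun m r => max m (r.getD 1 0)) f,
        rest.foldl (fun m r => max m (r.getD 2 0)) g,
        rest.foldl (fun m r => max m (r.getD 3 0)) h]) := by
  induction rest generalizing a b c d e f g h with
  | nil => simp
  | cons r t ih =>
    have ht : ∀ x ∈ t, 4 ≤ x.length := fun x hx => hr x (by simp [hx])
    simp only [List.foldl_cons, pvStepA_eq r, ih ht]

-- lower bound for the fold computing the minimum row length
lemma pvFoldMin_ge (t : List Nat) (a : Nat) (ha : 4 ≤ a) (ht : ∀ x ∈ t, 4 ≤ x) :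
    4 ≤ t.foldl min a := by
  induction t generalizing a with
  | nil => simpa
  | cons x s ih =>
    exact ih (min a x) (le_min ha (ht x (by simp))) (fun y hy => ht y (by simp [hy]))

-- ===== VERDICT (by name: the statement is the Claim_ definition above) =====
theorem calculate_rgbi_min_max_spec : Claim_equal_calculate_rgbi_min_max := by
  intro l _ hpre
  obtain ⟨hne, hlen⟩ := hpre
  obtain ⟨r0, rest, rfl⟩ := List.exists_cons_of_ne_nil hne
  have hr0 : 4 ≤ r0.length := hlen r0 (by simp)
  have hrest : ∀ r ∈ rest, 4 ≤ r.length := fun r hr => hlen r (by simp [hr])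
  have hL : 4 ≤ pvZipLen (r0 :: rest) := by
    simp only [pvZipLen, List.map_cons]
    exact pvFoldMin_ge (rest.map List.length) r0.length hr0
      (by intro x hx; obtain ⟨r, hr, rfl⟩ := List.mem_map.mp hx; exact hrest r hr)
  have hrng : PySem.List.pyRange 0 4 1 = [0, 1, 2, 3] := by decide
  -- reading column j (j < 4) out of the transposed list
  have hcol : ∀ (j : Nat), j < 4 → ∀ (f : Nat → List Int),
      PySem.List.pyGetD ((List.range (pvZipLen (r0 :: rest))).map f) (j : Int) [] = f j := by
    intro j hj f
    rw [PySem.List.pyGetD_natCast,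
        List.getD_eq_getElem _ _ (by simpa using lt_of_lt_of_le hj hL)]
    simp
  unfold Spec_calculate_rgbi_min_max calculate_rgbi_min_max_alt
  simp only [hrng, List.map_cons, List.map_nil]
  have hc0 := hcol 0 (by omega) (fun j => r0.getD j 0 :: List.map (fun r => r.getD j 0) rest)
  have hc1 := hcol 1 (by omega) (fun j => r0.getD j 0 :: List.map (fun r => r.getD j 0) rest)
  have hc2 := hcol 2 (by omega) (fun j => r0.getD j 0 :: List.map (fun r => r.getD j 0) rest)
  have hc3 := hcol 3 (by omega) (fun j => r0.getD j 0 :: List.map (fun r => r.getD j 0) rest)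
  push_cast at hc0 hc1 hc2 hc3
  rw [hc0, hc1, hc2, hc3]
  simp only [PySem.List.min?_id_cons, PySem.List.max?_id_cons, Option.getD_some]
  -- reduce A to the same per-channel folds
  unfold calculate_rgbi_min_max
  rw [PySem.List.foldl_pyRange_zero_pyGetD' (r0 :: rest) [] pvStepA]
  simp only [PySem.List.pyGetD_zero_cons, List.foldl_cons]
  rw [pvStepA_eq r0, pvFoldA_eq rest hrest]
  simp [PySem.List.pyGetD_ofNat', List.foldl_map, min_self, max_self]
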